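-- pv_equiv track=rewrite | github.com/YusraAlfares/Hybrid_Images | Hybrid_Images.py | morph_op
-- ===== SOURCE A (Python) =====
-- def cross_correlation_2d(image, kernel):
--     # Store height and width of image and kernel, calculate the padding needed to apply for the image
--     img_height = len(image)
--     img_width = len(image[0])
--     ker_height = len(kernel)
--     ker_width = len(kernel[0])
--     pad_height = ker_height // 2
--     pad_width = ker_width // 2
--
--     # Make padded image with zeros
--     padded_image = []
--     for i in range(img_height + 2 * pad_height):
--         row = [0] * (img_width + 2 * pad_width)
--         padded_image.append(row)
--     # Copy the original image into the center of the padded image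
--     for i in range(img_height):
--         for j in range(img_width):
--             padded_image[i + pad_height][j + pad_width] = image[i][j]
--
--     # Create output image
--     output = []
--     for i in range(img_height):
--         row = [0] * img_width
--         output.append(row)
--     # Apply the kernel to the padded image
--     for i in range(img_height):
--         for j in range(img_width):
--             sum = 0
--             for m in range(ker_height):
--                 for n in range(ker_width):
--                     sum += padded_image[i + m][j + n] * kernel[m][n]
--             output[i][j] = sum
--
--     return output
--
-- def convolve_2d(image, kernel):
--     # Get dimensions of the kernel
--     ker_height = len(kernel)
--     ker_width = len(kernel[0])
--     # Flip the kernel horizontally and vertically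
--     flipped_kernel = []
--     for i in range(ker_height):
--         row = []
--         for j in range(ker_width):
--             row.append(kernel[ker_height - 1 - i][ker_width - 1 - j])
--         flipped_kernel.append(row)
--     # Apply cross-correlation with the flipped kernel
--     return cross_correlation_2d(image, flipped_kernel)
--
-- def morph_op(image, operation):
--     # Define a 3x3 kernel filled with 1's
--     kernel = []
--     for _ in range(3):
--         row = [1] * 3
--         kernel.append(row)
--
--     if operation == 'dilation':
--         # Apply dilation using cross-correlation
--         return cross_correlation_2d(image, kernel)
--     elif operation == 'erosion':
--         # Apply erosion using convolution
--         return convolve_2d(image, kernel)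
-- ===== SOURCE B (Python) =====
-- def morph_op(image, operation):
--     # Separable 3x3 box filter: horizontal 3-tap pass, then vertical 3-tap pass
--     # (same result for 'dilation' and 'erosion'; None otherwise).
--     if operation not in ('dilation', 'erosion'):
--         return None
--     H = len(image)
--     W = len(image[0])
--     t = [[(row[j - 1] if j >= 1 else 0) + row[j] + (row[j + 1] if j + 1 < W else 0)
--           for j in range(W)] for row in image]
--     return [[(t[i - 1][j] if i >= 1 else 0) + t[i][j] + (t[i + 1][j] if i + 1 < H else 0)
--              for j in range(W)] for i in range(H)]
-- ===== Notes on version B (the rewrite author's own statement) =====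
-- stated objective: alternative
-- what changed: Replaces A's zero-padded image plus generic kernel cross-correlation/convolution (9 multiply-adds per pixel over a built 3x3 ones kernel) with a separable box filter: one horizontal 3-tap pass and one vertical 3-tap pass, with edge guards instead of padding; both operations share the same pass pair.
import Mathlib
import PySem

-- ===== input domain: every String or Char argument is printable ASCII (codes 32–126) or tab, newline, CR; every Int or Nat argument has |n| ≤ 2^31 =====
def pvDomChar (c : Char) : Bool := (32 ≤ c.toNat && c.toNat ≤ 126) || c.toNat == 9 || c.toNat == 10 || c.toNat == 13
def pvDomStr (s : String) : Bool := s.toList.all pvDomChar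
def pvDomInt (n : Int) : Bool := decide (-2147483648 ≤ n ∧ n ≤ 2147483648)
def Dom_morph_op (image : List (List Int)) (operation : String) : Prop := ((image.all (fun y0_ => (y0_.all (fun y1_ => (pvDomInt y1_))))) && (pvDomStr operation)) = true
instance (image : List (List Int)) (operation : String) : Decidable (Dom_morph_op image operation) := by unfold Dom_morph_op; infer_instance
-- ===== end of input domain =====

-- B replaces A's zero-padding + generic 3x3 ones-kernel correlation/convolution by two separable
-- 3-tap passes (horizontal then vertical) with edge guards; same return value, similar cost.

-- ===== PORT A =====
-- image[i][j] read / write on a list of lists (the indices range produces are in bounds on Pre_ inputs)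
def pvG2 (L : List (List Int)) (i j : Nat) : Int := (L.getD i []).getD j 0
def pvS2 (L : List (List Int)) (i j : Nat) (v : Int) : List (List Int) := L.set i ((L.getD i []).set j v)

def cross_correlation_2d (image kernel : List (List Int)) : List (List Int) :=
  let imgH := image.length
  let imgW := (image.headD []).length
  let kerH := kernel.length
  let kerW := (kernel.headD []).length
  let padH := kerH / 2
  let padW := kerW / 2
  let padded0 := (List.range (imgH + 2 * padH)).foldl (fun acc _ => acc ++ [List.replicate (imgW + 2 * padW) (0 : Int)]) []
  let padded := (List.range imgH).foldl (fun P i => (List.range imgW).foldl (fun P j => pvS2 P (i + padH) (j + padW) (pvG2 image i j)) P) padded0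
  let output0 := (List.range imgH).foldl (fun acc _ => acc ++ [List.replicate imgW (0 : Int)]) []
  (List.range imgH).foldl (fun O i => (List.range imgW).foldl (fun O j =>
      pvS2 O i j ((List.range kerH).foldl (fun s m => (List.range kerW).foldl (fun s n =>
        s + pvG2 padded (i + m) (j + n) * pvG2 kernel m n) s) 0)) O) output0

def convolve_2d (image kernel : List (List Int)) : List (List Int) :=
  let kerH := kernel.length
  let kerW := (kernel.headD []).length
  let flipped := (List.range kerH).foldl (fun acc i =>
    acc ++ [(List.range kerW).foldl (fun row j => row ++ [pvG2 kernel (kerH - 1 - i) (kerW - 1 - j)]) []]) []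
  cross_correlation_2d image flipped

def morph_op (image : List (List Int)) (operation : String) : Option (List (List Int)) :=
  let kernel := (List.range 3).foldl (fun acc _ => acc ++ [List.replicate 3 (1 : Int)]) []
  if operation = "dilation" then some (cross_correlation_2d image kernel)
  else if operation = "erosion" then some (convolve_2d image kernel)
  else none

-- ===== PORT B =====
def pvHRow (W : Nat) (row : List Int) : List Int :=
  (List.range W).map (fun j =>
    (if 1 ≤ j then row.getD (j - 1) 0 else 0) + row.getD j 0 + (if j + 1 < W then row.getD (j + 1) 0 else 0))

def morph_op_alt (image : List (List Int)) (operation : String) : Option (List (List Int)) :=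
  if operation = "dilation" ∨ operation = "erosion" then
    let H := image.length
    let W := (image.headD []).length
    let t := image.map (pvHRow W)
    some ((List.range H).map (fun i => (List.range W).map (fun j =>
      (if 1 ≤ i then (t.getD (i - 1) []).getD j 0 else 0) + (t.getD i []).getD j 0 +
      (if i + 1 < H then (t.getD (i + 1) []).getD j 0 else 0))))
  else none

-- ===== PRECONDITION & SPEC =====
-- Pre_ excludes exactly the inputs on which Python A raises IndexError: for the two real
-- operations, an empty image (image[0]) or a row shorter than the first row (image[i][j]).
def Pre_morph_op (image : List (List Int)) (operation : String) : Prop :=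
  (operation = "dilation" ∨ operation = "erosion") →
    (image ≠ [] ∧ ∀ r ∈ image, (image.headD []).length ≤ r.length)
instance (image : List (List Int)) (operation : String) : Decidable (Pre_morph_op image operation) := by unfold Pre_morph_op; infer_instance
def pvWitness_morph_op : List (List Int) × String := ([[1, 2], [3, 4]], "dilation")

def Spec_morph_op (image : List (List Int)) (operation : String) (out : Option (List (List Int))) : Prop := out = morph_op_alt image operation
instance (image : List (List Int)) (operation : String) (out : Option (List (List Int))) : Decidable (Spec_morph_op image operation out) := by unfold Spec_morph_op; infer_instance

-- ===== CLAIM (what is proved, stated in full; the proofs are below) =====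
def Claim_equal_morph_op : Prop := ∀ (image : List (List Int)) (operation : String), Dom_morph_op image operation → Pre_morph_op image operation → Spec_morph_op image operation (morph_op image operation)

-- ===== LEMMAS AND PROOFS =====

-- proof-only helpers: the padded image and the 3x3 windowed sum A computes per pixel
def pvPadded (image : List (List Int)) : List (List Int) :=
  (List.range image.length).foldl (fun P i => (List.range (image.headD []).length).foldl
    (fun P j => pvS2 P (i + 1) (j + 1) (pvG2 image i j)) P)
    ((List.range (image.length + 2)).foldl (fun acc _ => acc ++ [List.replicate ((image.headD []).length + 2) (0 : Int)]) [])

def pvSum (image : List (List Int)) (i j : Nat) : Int :=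
  (List.range 3).foldl (fun s m => (List.range 3).foldl (fun s n =>
    s + pvG2 (pvPadded image) (i + m) (j + n) * pvG2 [[1,1,1],[1,1,1],[1,1,1]] m n) s) 0

theorem pv_appendFold {α : Type} (x : α) (n : Nat) : ∀ (a : List α),
    (List.range n).foldl (fun acc _ => acc ++ [x]) a = a ++ List.replicate n x := by
  induction n with
  | zero => intro a; simp
  | succ n ih =>
    intro a
    rw [List.range_succ, List.foldl_append, ih a]
    simp [List.replicate_succ']

theorem pv_getD_set (row : List Int) (i c : Nat) (x : Int) :
    (row.set i x).getD c 0 = if i = c ∧ i < row.length then x else row.getD c 0 := by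
  by_cases hic : i = c
  · subst hic
    by_cases hl : i < row.length
    · simp [List.getD_eq_getElem?_getD, hl]
    · rw [List.set_eq_of_length_le (by omega), if_neg (by omega)]
  · simp [List.getD_eq_getElem?_getD, List.getElem?_set, hic]

theorem pv_rowFill_len (u : Nat → Int) (o : Nat) (m : Nat) : ∀ (k : Nat) (row : List Int),
    ((List.range' k m).foldl (fun r j => r.set (j + o) (u j)) row).length = row.length := by
  induction m with
  | zero => intro k row; rfl
  | succ m ih =>
    intro k row
    rw [List.range'_succ, List.foldl_cons, ih]
    simp

theorem pv_rowFill_getD (u : Nat → Int) (o : Nat) (m : Nat) : ∀ (k : Nat) (row : List Int) (c : Nat),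
    ((List.range' k m).foldl (fun r j => r.set (j + o) (u j)) row).getD c 0
    = if k + o ≤ c ∧ c < k + m + o ∧ c < row.length then u (c - o) else row.getD c 0 := by
  induction m with
  | zero =>
    intro k row c
    simp only [List.range'_zero, List.foldl_nil]
    rw [if_neg (by omega)]
  | succ m ih =>
    intro k row c
    rw [List.range'_succ, List.foldl_cons, ih]
    rw [List.length_set, pv_getD_set]
    by_cases h1 : k + 1 + o ≤ c ∧ c < k + 1 + m + o ∧ c < row.length
    · rw [if_pos h1, if_pos (by omega)]
    · rw [if_neg h1]
      by_cases h2 : k + o = c ∧ k + o < row.length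
      · rw [if_pos h2, if_pos (by omega)]
        have : c - o = k := by omega
        rw [this]
      · rw [if_neg h2, if_neg (by omega)]

theorem pv_set_getD_self (P : List (List Int)) (a : Nat) :
    P.set a (P.getD a []) = P := by
  by_cases h : a < P.length
  · apply List.ext_getElem (by simp)
    intro i h1 h2
    rw [List.getElem_set]
    split_ifs with hia
    · subst hia; rw [List.getD_eq_getElem P [] h]
    · rfl
  · exact List.set_eq_of_length_le (by omega)

theorem pv_getD_set_row (P : List (List Int)) (a r : Nat) (v : List Int) :
    (P.set a v).getD r [] = if a = r ∧ a < P.length then v else P.getD r [] := by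
  by_cases har : a = r
  · subst har
    by_cases hl : a < P.length
    · simp [List.getD_eq_getElem?_getD, hl]
    · rw [List.set_eq_of_length_le (by omega), if_neg (by omega)]
  · simp [List.getD_eq_getElem?_getD, List.getElem?_set, har]

theorem pv_inner_as_setRow (f : Nat → Int) (o a : Nat) (js : List Nat) : ∀ (P : List (List Int)),
    js.foldl (fun P j => pvS2 P a (j + o) (f j)) P
    = P.set a (js.foldl (fun r j => r.set (j + o) (f j)) (P.getD a [])) := by
  induction js with
  | nil => intro P; simpa using (pv_set_getD_self P a).symm
  | cons j js ih =>
    intro P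
    rw [List.foldl_cons, List.foldl_cons, ih]
    unfold pvS2
    rw [List.set_set]
    congr 1
    rw [pv_getD_set_row]
    split_ifs with h
    · rfl
    · have hl : P.length ≤ a := by
        by_contra hc
        exact h ⟨rfl, by omega⟩
      rw [List.getD_eq_default _ _ (by omega : P.length ≤ a)]
      simp

theorem pv_rowFill_getD' (u : Nat → Int) (o : Nat) (W : Nat) (row : List Int) (c : Nat) :
    ((List.range W).foldl (fun r j => r.set (j + o) (u j)) row).getD c 0
    = if o ≤ c ∧ c < W + o ∧ c < row.length then u (c - o) else row.getD c 0 := by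
  rw [List.range_eq_range', pv_rowFill_getD]
  simp

theorem pv_grid_len (v : Nat → Nat → Int) (o o' W m : Nat) : ∀ (k : Nat) (P : List (List Int)),
    ((List.range' k m).foldl (fun P i => (List.range W).foldl (fun P j => pvS2 P (i + o) (j + o') (v i j)) P) P).length = P.length := by
  induction m with
  | zero => intro k P; rfl
  | succ m ih =>
    intro k P
    rw [List.range'_succ, List.foldl_cons, ih, pv_inner_as_setRow]
    simp

theorem pv_grid_rowlen (v : Nat → Nat → Int) (o o' W m : Nat) : ∀ (k : Nat) (P : List (List Int)) (r : Nat),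
    (((List.range' k m).foldl (fun P i => (List.range W).foldl (fun P j => pvS2 P (i + o) (j + o') (v i j)) P) P).getD r []).length = (P.getD r []).length := by
  induction m with
  | zero => intro k P r; rfl
  | succ m ih =>
    intro k P r
    rw [List.range'_succ, List.foldl_cons, ih, pv_inner_as_setRow, pv_getD_set_row]
    split_ifs with h
    · rw [List.range_eq_range', pv_rowFill_len]
      rw [h.1]
    · rfl

theorem pv_grid_g2 (v : Nat → Nat → Int) (o o' W m : Nat) : ∀ (k : Nat) (P : List (List Int)) (r c : Nat),
    pvG2 ((List.range' k m).foldl (fun P i => (List.range W).foldl (fun P j => pvS2 P (i + o) (j + o') (v i j)) P) P) r c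
    = if k + o ≤ r ∧ r < k + m + o ∧ r < P.length ∧ o' ≤ c ∧ c < W + o' ∧ c < (P.getD r []).length
      then v (r - o) (c - o') else pvG2 P r c := by
  induction m with
  | zero =>
    intro k P r c
    simp only [List.range'_zero, List.foldl_nil]
    rw [if_neg (by omega)]
  | succ m ih =>
    intro k P r c
    rw [List.range'_succ, List.foldl_cons, ih, pv_inner_as_setRow]
    have hlen : (P.set (k + o) ((List.range W).foldl (fun r j => r.set (j + o') (v k j)) (P.getD (k + o) []))).length = P.length := by simp
    have hrowlen : ∀ r', ((P.set (k + o) ((List.range W).foldl (fun r j => r.set (j + o') (v k j)) (P.getD (k + o) []))).getD r' []).length = (P.getD r' []).length := by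
      intro r'
      rw [pv_getD_set_row]
      split_ifs with h
      · rw [List.range_eq_range', pv_rowFill_len, h.1]
      · rfl
    rw [hlen, hrowlen]
    by_cases h1 : k + 1 + o ≤ r ∧ r < k + 1 + m + o ∧ r < P.length ∧ o' ≤ c ∧ c < W + o' ∧ c < (P.getD r []).length
    · rw [if_pos h1, if_pos (by omega)]
    · rw [if_neg h1]
      unfold pvG2
      rw [pv_getD_set_row]
      by_cases h2 : k + o = r ∧ k + o < P.length
      · rw [if_pos h2, pv_rowFill_getD']
        obtain ⟨hk, hkl⟩ := h2
        subst hk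
        by_cases h3 : o' ≤ c ∧ c < W + o' ∧ c < (P.getD (k + o) []).length
        · rw [if_pos h3, if_pos (⟨by omega, by omega, by omega, h3.1, h3.2.1, h3.2.2⟩ :
            k + o ≤ k + o ∧ k + o < k + (m + 1) + o ∧ k + o < P.length ∧ o' ≤ c ∧ c < W + o' ∧ c < (P.getD (k + o) []).length)]
          congr 1
          omega
        · rw [if_neg h3, if_neg (fun hc => h3 ⟨hc.2.2.2.1, hc.2.2.2.2.1, hc.2.2.2.2.2⟩ :
            ¬(k + o ≤ k + o ∧ k + o < k + (m + 1) + o ∧ k + o < P.length ∧ o' ≤ c ∧ c < W + o' ∧ c < (P.getD (k + o) []).length))]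
      · rw [if_neg h2]
        by_cases hc : k + o ≤ r ∧ r < k + (m + 1) + o ∧ r < P.length ∧ o' ≤ c ∧ c < W + o' ∧ c < (P.getD r []).length
        · exfalso
          apply h1
          have hne : k + o ≠ r := fun he => h2 ⟨he, by omega⟩
          exact ⟨by omega, by omega, hc.2.2.1, hc.2.2.2.1, hc.2.2.2.2.1, hc.2.2.2.2.2⟩
        · rw [if_neg hc]

theorem pv_cross_skeleton (image : List (List Int)) :
    cross_correlation_2d image [[1,1,1],[1,1,1],[1,1,1]] =
    (List.range image.length).foldl (fun O i => (List.range (image.headD []).length).foldl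
      (fun O j => pvS2 O (i + 0) (j + 0) (pvSum image i j)) O)
      ((List.range image.length).foldl (fun acc _ => acc ++ [List.replicate (image.headD []).length (0 : Int)]) []) := rfl

theorem pv_g2_zeros (n w r c : Nat) : pvG2 (List.replicate n (List.replicate w (0 : Int))) r c = 0 := by
  simp only [pvG2, List.getD_eq_getElem?_getD, List.getElem?_replicate]
  split_ifs <;> simp

theorem pv_padded_g2 (image : List (List Int)) (r c : Nat) :
    pvG2 (pvPadded image) r c =
    if 1 ≤ r ∧ r ≤ image.length ∧ 1 ≤ c ∧ c ≤ (image.headD []).length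
    then pvG2 image (r - 1) (c - 1) else 0 := by
  unfold pvPadded
  rw [pv_appendFold, List.nil_append,
    show List.range image.length = List.range' 0 image.length from List.range_eq_range',
    pv_grid_g2]
  rw [List.length_replicate]
  by_cases hb : 1 ≤ r ∧ r ≤ image.length ∧ 1 ≤ c ∧ c ≤ (image.headD []).length
  · have hrow : ((List.replicate (image.length + 2) (List.replicate ((image.headD []).length + 2) (0 : Int))).getD r []).length = (image.headD []).length + 2 := by
      rw [List.getD_eq_getElem _ _ (by simpa using (by omega : r < image.length + 2)), List.getElem_replicate, List.length_replicate]
    rw [hrow, if_pos (by omega), if_pos hb]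
  · rw [if_neg (by
      intro hc
      apply hb
      exact ⟨by omega, by omega, by omega, by omega⟩), if_neg hb]
    exact pv_g2_zeros _ _ _ _

theorem pv_t_getD (image : List (List Int)) (W r j : Nat) (hj : j < W) :
    ((image.map (pvHRow W)).getD r []).getD j 0
    = (if 1 ≤ j then pvG2 image r (j - 1) else 0) + pvG2 image r j
      + (if j + 1 < W then pvG2 image r (j + 1) else 0) := by
  rcases lt_or_ge r image.length with hr | hr
  · have h1 : (image.map (pvHRow W)).getD r [] = pvHRow W (image.getD r []) := by
      rw [List.getD_eq_getElem _ _ (by simpa using hr), List.getElem_map, List.getD_eq_getElem _ _ hr]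
    rw [h1]
    unfold pvHRow
    rw [List.getD_eq_getElem _ _ (by simpa using hj), List.getElem_map, List.getElem_range]
    rfl
  · have h1 : (image.map (pvHRow W)).getD r [] = [] := List.getD_eq_default _ _ (by simpa using hr)
    have h2 : image.getD r [] = [] := List.getD_eq_default _ _ hr
    rw [h1]
    unfold pvG2
    rw [h2]
    simp

set_option maxHeartbeats 1000000 in
theorem pv_cell (image : List (List Int)) (i j : Nat)
    (hi : i < image.length) (hj : j < (image.headD []).length) :
    pvSum image i j =
    (if 1 ≤ i then ((image.map (pvHRow (image.headD []).length)).getD (i - 1) []).getD j 0 else 0)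
    + ((image.map (pvHRow (image.headD []).length)).getD i []).getD j 0
    + (if i + 1 < image.length then ((image.map (pvHRow (image.headD []).length)).getD (i + 1) []).getD j 0 else 0) := by
  have hs : pvSum image i j =
      0 + pvG2 (pvPadded image) i j * 1 + pvG2 (pvPadded image) i (j + 1) * 1 + pvG2 (pvPadded image) i (j + 2) * 1
        + pvG2 (pvPadded image) (i + 1) j * 1 + pvG2 (pvPadded image) (i + 1) (j + 1) * 1 + pvG2 (pvPadded image) (i + 1) (j + 2) * 1
        + pvG2 (pvPadded image) (i + 2) j * 1 + pvG2 (pvPadded image) (i + 2) (j + 1) * 1 + pvG2 (pvPadded image) (i + 2) (j + 2) * 1 := rfl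
  rw [hs]
  simp only [pv_padded_g2, mul_one, zero_add]
  rw [pv_t_getD image _ i j hj, pv_t_getD image _ (i - 1) j hj, pv_t_getD image _ (i + 1) j hj]
  simp only [
    show (1 ≤ i ∧ i ≤ image.length ∧ 1 ≤ j ∧ j ≤ (image.headD []).length) = (1 ≤ i ∧ 1 ≤ j) from propext (by omega),
    show (1 ≤ i ∧ i ≤ image.length ∧ 1 ≤ j + 1 ∧ j + 1 ≤ (image.headD []).length) = (1 ≤ i) from propext (by omega),
    show (1 ≤ i ∧ i ≤ image.length ∧ 1 ≤ j + 2 ∧ j + 2 ≤ (image.headD []).length) = (1 ≤ i ∧ j + 2 ≤ (image.headD []).length) from propext (by omega),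
    show (1 ≤ i + 1 ∧ i + 1 ≤ image.length ∧ 1 ≤ j ∧ j ≤ (image.headD []).length) = (1 ≤ j) from propext (by omega),
    show (1 ≤ i + 1 ∧ i + 1 ≤ image.length ∧ 1 ≤ j + 1 ∧ j + 1 ≤ (image.headD []).length) = True from eq_true (by omega),
    show (1 ≤ i + 1 ∧ i + 1 ≤ image.length ∧ 1 ≤ j + 2 ∧ j + 2 ≤ (image.headD []).length) = (j + 2 ≤ (image.headD []).length) from propext (by omega),
    show (1 ≤ i + 2 ∧ i + 2 ≤ image.length ∧ 1 ≤ j ∧ j ≤ (image.headD []).length) = (i + 2 ≤ image.length ∧ 1 ≤ j) from propext (by omega),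
    show (1 ≤ i + 2 ∧ i + 2 ≤ image.length ∧ 1 ≤ j + 1 ∧ j + 1 ≤ (image.headD []).length) = (i + 2 ≤ image.length) from propext (by omega),
    show (1 ≤ i + 2 ∧ i + 2 ≤ image.length ∧ 1 ≤ j + 2 ∧ j + 2 ≤ (image.headD []).length) = (i + 2 ≤ image.length ∧ j + 2 ≤ (image.headD []).length) from propext (by omega),
    show (j + 1 < (image.headD []).length) = (j + 2 ≤ (image.headD []).length) from propext (by omega),
    show (i + 1 < image.length) = (i + 2 ≤ image.length) from propext (by omega),
    show i + 1 - 1 = i from by omega, show j + 1 - 1 = j from by omega,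
    show i + 2 - 1 = i + 1 from by omega, show j + 2 - 1 = j + 1 from by omega,
    if_true]
  by_cases A1 : 1 ≤ i
  · by_cases A2 : i + 2 ≤ image.length
    · simp only [eq_true A1, eq_true A2, true_and, and_true, if_true]
      split_ifs <;> ring
    · simp only [eq_true A1, eq_false A2, true_and, and_true, false_and, and_false, if_true, if_false]
      split_ifs <;> ring
  · by_cases A2 : i + 2 ≤ image.length
    · simp only [eq_false A1, eq_true A2, true_and, and_true, false_and, and_false, if_true, if_false]
      split_ifs <;> ring
    · simp only [eq_false A1, eq_false A2, false_and, and_false, if_false]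
      split_ifs <;> ring

theorem pv_outfold_eq (v : Nat → Nat → Int) (H W : Nat) :
    (List.range' 0 H).foldl (fun O i => (List.range W).foldl (fun O j => pvS2 O (i + 0) (j + 0) (v i j)) O)
      (List.replicate H (List.replicate W (0 : Int)))
    = (List.range H).map (fun i => (List.range W).map (fun j => v i j)) := by
  have hL : ((List.range' 0 H).foldl (fun O i => (List.range W).foldl (fun O j => pvS2 O (i + 0) (j + 0) (v i j)) O)
      (List.replicate H (List.replicate W (0 : Int)))).length = H := by
    rw [pv_grid_len]; simp
  apply List.ext_getElem
  · rw [hL]; simp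
  · intro i h1 h2
    have hiH : i < H := by rwa [hL] at h1
    have hrowD : ((List.range' 0 H).foldl (fun O i => (List.range W).foldl (fun O j => pvS2 O (i + 0) (j + 0) (v i j)) O)
        (List.replicate H (List.replicate W (0 : Int)))).getD i []
        = ((List.range' 0 H).foldl (fun O i => (List.range W).foldl (fun O j => pvS2 O (i + 0) (j + 0) (v i j)) O)
        (List.replicate H (List.replicate W (0 : Int))))[i] := List.getD_eq_getElem _ _ h1
    have hrowlen : (((List.range' 0 H).foldl (fun O i => (List.range W).foldl (fun O j => pvS2 O (i + 0) (j + 0) (v i j)) O)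
        (List.replicate H (List.replicate W (0 : Int))))[i]).length = W := by
      rw [← hrowD, pv_grid_rowlen, List.getD_eq_getElem _ _ (by simpa using hiH), List.getElem_replicate, List.length_replicate]
    apply List.ext_getElem
    · rw [hrowlen]; simp
    · intro j hj1 hj2
      have hjW : j < W := by rwa [hrowlen] at hj1
      have hg : pvG2 ((List.range' 0 H).foldl (fun O i => (List.range W).foldl (fun O j => pvS2 O (i + 0) (j + 0) (v i j)) O)
          (List.replicate H (List.replicate W (0 : Int)))) i j
          = ((List.range' 0 H).foldl (fun O i => (List.range W).foldl (fun O j => pvS2 O (i + 0) (j + 0) (v i j)) O)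
          (List.replicate H (List.replicate W (0 : Int))))[i][j] := by
        unfold pvG2
        rw [hrowD, List.getD_eq_getElem _ _ hj1]
      rw [← hg, pv_grid_g2]
      rw [if_pos (by
        refine ⟨by omega, by omega, by simpa using hiH, by omega, by omega, ?_⟩
        rw [List.getD_eq_getElem _ _ (by simpa using hiH), List.getElem_replicate, List.length_replicate]
        exact hjW)]
      simp [hiH, hjW]

theorem pv_morph_main (image : List (List Int)) :
    cross_correlation_2d image [[1,1,1],[1,1,1],[1,1,1]] =
    (List.range image.length).map (fun i => (List.range (image.headD []).length).map (fun j =>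
      (if 1 ≤ i then ((image.map (pvHRow (image.headD []).length)).getD (i - 1) []).getD j 0 else 0) +
      ((image.map (pvHRow (image.headD []).length)).getD i []).getD j 0 +
      (if i + 1 < image.length then ((image.map (pvHRow (image.headD []).length)).getD (i + 1) []).getD j 0 else 0))) := by
  rw [pv_cross_skeleton, pv_appendFold, List.nil_append]
  conv_lhs => rw [show List.range image.length = List.range' 0 image.length from List.range_eq_range']
  rw [pv_outfold_eq]
  apply List.map_congr_left
  intro i hi
  apply List.map_congr_left
  intro j hj
  exact pv_cell image i j (by simpa using hi) (by simpa using hj)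

-- ===== VERDICT (by name: the statement is the Claim_ definition above) =====
theorem morph_op_spec : Claim_equal_morph_op := by
  intro image operation _ _
  unfold Spec_morph_op
  by_cases hd : operation = "dilation"
  · subst hd
    have hA : morph_op image "dilation" = some (cross_correlation_2d image [[1,1,1],[1,1,1],[1,1,1]]) := rfl
    have hB : morph_op_alt image "dilation" =
        some ((List.range image.length).map (fun i => (List.range (image.headD []).length).map (fun j =>
          (if 1 ≤ i then ((image.map (pvHRow (image.headD []).length)).getD (i - 1) []).getD j 0 else 0) +
          ((image.map (pvHRow (image.headD []).length)).getD i []).getD j 0 +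
          (if i + 1 < image.length then ((image.map (pvHRow (image.headD []).length)).getD (i + 1) []).getD j 0 else 0)))) := rfl
    rw [hA, hB, pv_morph_main image]
  · by_cases he : operation = "erosion"
    · subst he
      have hA : morph_op image "erosion" = some (cross_correlation_2d image [[1,1,1],[1,1,1],[1,1,1]]) := rfl
      have hB : morph_op_alt image "erosion" =
          some ((List.range image.length).map (fun i => (List.range (image.headD []).length).map (fun j =>
            (if 1 ≤ i then ((image.map (pvHRow (image.headD []).length)).getD (i - 1) []).getD j 0 else 0) +
            ((image.map (pvHRow (image.headD []).length)).getD i []).getD j 0 +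
            (if i + 1 < image.length then ((image.map (pvHRow (image.headD []).length)).getD (i + 1) []).getD j 0 else 0)))) := rfl
      rw [hA, hB, pv_morph_main image]
    · simp [morph_op, morph_op_alt, hd, he]
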